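-- pv_equiv track=rewrite | github.com/hivesolutions/colony-plugins | pt.hive.colony.language.wiki/src/colony/language_wiki/wiki_ast.py | _strip_contents
-- ===== SOURCE A (Python) =====
-- def _strip_contents(contents):
--     """
--     Strips the given contents according to the tag specification.
--
--     @type contents: String
--     @param contents: The contents to be stripped.
--     @rtype: String
--     @return: The stripped contents.
--     """
--
--     # starts the index
--     index = 0
--
--     # start the temporary index
--     index_temporary = 0
--
--     # iterates over the contents
--     for content in contents:
--         # increments the temporary index
--         index_temporary += 1
--
--         # in case the content is a space
--         if content in (" ", "\r"):
--             pass
--         # in case the content is a newline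
--         elif content == "\n":
--             index = index_temporary
--         # in case the content is a character other than a space
--         elif not content == " ":
--             break
--
--     # retrieves the left stripped contents
--     contents_left_stripped = contents[index:]
--
--     # strips the contents
--     contents_stripped = contents_left_stripped.rstrip()
--
--     # returns the stripped contents
--     return contents_stripped
-- ===== SOURCE B (Python) =====
-- def _strip_contents(contents):
--     prefix_len = len(contents) - len(contents.lstrip(" \r\n"))
--     prefix = contents[:prefix_len]
--     index = prefix.rfind("\n") + 1
--     return contents[index:].rstrip()
-- ===== Notes on version B (the rewrite author's own statement) =====
-- stated objective: simpler
-- what changed: Replaces the stateful character loop (two counters plus break) with three library calls: lstrip over space/CR/LF to find the leading-whitespace boundary, rfind of the last newline within that prefix for the cut point, then rstrip.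
import Mathlib
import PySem

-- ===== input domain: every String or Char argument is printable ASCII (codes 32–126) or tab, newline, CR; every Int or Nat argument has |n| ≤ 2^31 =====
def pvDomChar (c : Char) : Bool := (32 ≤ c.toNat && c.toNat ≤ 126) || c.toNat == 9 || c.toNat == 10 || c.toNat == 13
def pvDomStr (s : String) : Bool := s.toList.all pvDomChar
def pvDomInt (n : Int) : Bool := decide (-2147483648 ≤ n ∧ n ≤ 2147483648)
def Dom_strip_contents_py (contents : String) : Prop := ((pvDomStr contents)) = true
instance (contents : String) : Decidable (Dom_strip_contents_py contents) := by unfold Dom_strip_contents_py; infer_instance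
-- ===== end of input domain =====

-- B replaces A's stateful character loop (two counters plus break) with library calls:
-- lstrip over space/CR/LF for the leading-whitespace boundary, rfind of the last newline
-- inside that prefix, then rstrip.

-- ===== PORT A =====
-- A's for-loop with break: index / index_temporary carried as accumulators; break returns index.
def stripALoop : List Char → Nat → Nat → Nat
  | [], index, _ => index
  | c :: rest, index, tmp =>
    if c = ' ' ∨ c = '\r' then stripALoop rest index (tmp + 1)
    else if c = '\n' then stripALoop rest (tmp + 1) (tmp + 1)
    else if ¬ c = ' ' then index   -- break
    else stripALoop rest index (tmp + 1)

def strip_contents_py (contents : String) : String :=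
  let index : Int := (stripALoop contents.toList 0 0 : Nat)
  PySem.Str.rstrip (PySem.Str.slice contents (some index) none)

-- ===== PORT B =====
def strip_contents_py_alt (contents : String) : String :=
  -- contents.lstrip(" \r\n") ported as dropWhile over that exact char set (exact)
  let lstripped := contents.toList.dropWhile (fun c => ([' ', '\r', '\n'] : List Char).contains c)
  let prefix_len : Int := PySem.Str.len contents - (lstripped.length : Int)
  let pre := PySem.Str.slice contents none (some prefix_len)
  let index : Int := PySem.Str.rfind pre "\n" + 1
  PySem.Str.rstrip (PySem.Str.slice contents (some index) none)

-- ===== PRECONDITION & SPEC =====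
def Spec_strip_contents_py (contents : String) (out : String) : Prop := out = strip_contents_py_alt contents
instance (contents : String) (out : String) : Decidable (Spec_strip_contents_py contents out) := by unfold Spec_strip_contents_py; infer_instance

-- ===== CLAIM (what is proved, stated in full; the proofs are below) =====
def Claim_equal_strip_contents_py : Prop := ∀ (contents : String), Dom_strip_contents_py contents → Spec_strip_contents_py contents (strip_contents_py contents)

-- ===== LEMMAS AND PROOFS =====

-- the whitespace predicate of the leading run
def wsP (c : Char) : Bool := ([' ', '\r', '\n'] : List Char).contains c

-- last index of '\n' in a list, if any
def lastNl : List Char → Option Nat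
  | [] => none
  | c :: rest =>
    match lastNl rest with
    | some j => some (j + 1)
    | none => if c = '\n' then some 0 else none

theorem lastNl_append_singleton (l : List Char) (c : Char) :
    lastNl (l ++ [c]) = if c = '\n' then some l.length else lastNl l := by
  induction l with
  | nil => by_cases h : c = '\n' <;> simp [lastNl, h]
  | cons a t ih =>
    by_cases h : c = '\n'
    · subst h; simp [lastNl, ih]
    · simp [lastNl, ih, h]


-- A's loop computes: last '\n' position within the leading wsP-run, plus one (0 if none)
theorem stripALoop_eq (cs : List Char) (index tmp : Nat) :
    stripALoop cs index tmp =
      match lastNl (cs.takeWhile wsP) with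
      | none => index
      | some j => tmp + j + 1 := by
  induction cs generalizing index tmp with
  | nil => simp [stripALoop, lastNl]
  | cons c rest ih =>
    by_cases hsp : c = ' ' ∨ c = '\r'
    · have hne : ¬ c = '\n' := by rcases hsp with h | h <;> simp [h]
      have hw : wsP c = true := by rcases hsp with h | h <;> simp [wsP, h]
      rw [List.takeWhile_cons_of_pos hw]
      simp only [stripALoop, if_pos hsp, ih]
      rcases h : lastNl (rest.takeWhile wsP) with _ | j <;> (simp [lastNl, h, hne]; try omega)
    · by_cases hnl : c = '\n'
      · have hw : wsP c = true := by simp [wsP, hnl]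
        rw [List.takeWhile_cons_of_pos hw]
        simp only [stripALoop, if_neg hsp, if_pos hnl, ih]
        rcases h : lastNl (rest.takeWhile wsP) with _ | j <;> (simp [lastNl, h, hnl]; try omega)
      · have hns : ¬ c = ' ' := fun h => hsp (Or.inl h)
        have hnr : ¬ c = '\r' := fun h => hsp (Or.inr h)
        have hw : ¬ wsP c = true := by simp [wsP, hns, hnr, hnl]
        rw [List.takeWhile_cons_of_neg hw]
        simp only [stripALoop, if_neg hsp, if_neg hnl, lastNl]
        rw [if_pos hns]

theorem isPrefixOf_nl (l : List Char) :
    (['\n'] : List Char).isPrefixOf l = true ↔ l.head? = some '\n' := by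
  cases l with
  | nil => decide
  | cons a t =>
    simp only [List.isPrefixOf, List.head?_cons, Option.some.injEq, Bool.and_eq_true,
      beq_iff_eq]
    constructor
    · rintro ⟨h, -⟩; exact h.symm
    · intro h; exact ⟨h.symm, trivial⟩

-- rfind.go searches downward: it is lastNl of the (k+1)-prefix
theorem rfind_go_eq (s : List Char) (k : Nat) :
    PySem.Chars.rfind.go s ['\n'] k =
      match lastNl (s.take (k + 1)) with
      | none => (-1 : Int)
      | some j => (j : Int) := by
  induction k with
  | zero =>
    simp only [PySem.Chars.rfind.go]
    rcases s with _ | ⟨c, t⟩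
    · decide
    · by_cases h : c = '\n'
      · simp [List.take, lastNl, h]
      · have hp : (['\n'] : List Char).isPrefixOf (c :: t) = false := by
          rw [Bool.eq_false_iff]
          intro hp
          have hhd := (isPrefixOf_nl (c :: t)).1 hp
          simp only [List.head?_cons, Option.some.injEq] at hhd
          exact h hhd
        simp [List.take, lastNl, hp, h]
  | succ j ih =>
    simp only [PySem.Chars.rfind.go, ih]
    by_cases hlt : j + 1 < s.length
    · have htake : s.take (j + 2) = s.take (j + 1) ++ [s[j+1]] := by
        rw [List.take_add_one]; simp [List.getElem?_eq_getElem hlt]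
      by_cases hc : s[j+1] = '\n'
      · have hpre : (['\n'] : List Char).isPrefixOf (s.drop (j + 1)) = true := by
          rw [isPrefixOf_nl, List.head?_drop, List.getElem?_eq_getElem hlt, hc]
        rw [htake, lastNl_append_singleton]
        simp [hpre, hc, List.length_take, Nat.min_eq_left (Nat.le_of_lt hlt)]
      · have hpre : (['\n'] : List Char).isPrefixOf (s.drop (j + 1)) = false := by
          rw [Bool.eq_false_iff]
          intro h
          rw [isPrefixOf_nl, List.head?_drop, List.getElem?_eq_getElem hlt] at h
          exact hc (Option.some_injective _ h)
        rw [htake, lastNl_append_singleton]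
        simp [hpre, hc]
    · have hdrop : s.drop (j + 1) = [] := List.drop_eq_nil_of_le (by omega)
      have htake : s.take (j + 2) = s.take (j + 1) := by
        rw [List.take_of_length_le (by omega), List.take_of_length_le (by omega)]
      simp [hdrop, htake]

theorem rfind_nl_eq (s : List Char) :
    PySem.Chars.rfind s ['\n'] =
      match lastNl s with
      | none => (-1 : Int)
      | some j => (j : Int) := by
  rw [PySem.Chars.rfind, rfind_go_eq, List.take_of_length_le (by omega)]

theorem take_takeWhile_length {α : Type} (p : α → Bool) (l : List α) :
    l.take (l.takeWhile p).length = l.takeWhile p := by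
  induction l with
  | nil => simp
  | cons a t ih => by_cases h : p a <;> simp [h, ih]

-- ===== VERDICT (by name: the statement is the Claim_ definition above) =====
theorem strip_contents_py_spec : Claim_equal_strip_contents_py := by
  intro contents _
  unfold Spec_strip_contents_py strip_contents_py strip_contents_py_alt
  set cs := contents.toList with hcs
  -- reduce B's prefix computation to takeWhile
  have hlen : PySem.Str.len contents - ((cs.dropWhile wsP).length : Int)
      = ((cs.takeWhile wsP).length : Int) := by
    have h := congrArg List.length (List.takeWhile_append_dropWhile (p := wsP) (l := cs))
    simp only [List.length_append] at h
    simp only [PySem.Str.len, ← hcs]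
    omega
  have hpre : (PySem.Str.slice contents none
      (some (PySem.Str.len contents - ((cs.dropWhile wsP).length : Int)))).toList
      = cs.takeWhile wsP := by
    rw [hlen, PySem.Str.toList_slice, PySem.Chars.slice_eq_listSlice,
      PySem.List.slice_to _ (by positivity)]
    simp only [Int.toNat_natCast, ← hcs]
    exact take_takeWhile_length wsP cs
  have hrf : PySem.Str.rfind (PySem.Str.slice contents none
      (some (PySem.Str.len contents - ((cs.dropWhile wsP).length : Int)))) "\n"
      = match lastNl (cs.takeWhile wsP) with
        | none => (-1 : Int)
        | some j => (j : Int) := by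
    rw [PySem.Str.rfind_eq, hpre]
    have : ("\n" : String).toList = ['\n'] := rfl
    rw [this, rfind_nl_eq]
  have hA : ((stripALoop cs 0 0 : Nat) : Int)
      = (match lastNl (cs.takeWhile wsP) with
        | none => (-1 : Int)
        | some j => (j : Int)) + 1 := by
    rw [stripALoop_eq]
    rcases lastNl (cs.takeWhile wsP) with _ | j <;> simp
  have hfun : (fun c => ([' ', '\r', '\n'] : List Char).contains c) = wsP := by
    funext c; rfl
  simp only [hfun, hrf]
  rw [hA]
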